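-- pv_equiv track=rewrite | github.com/mahenzon/leetcode-solutions | python/2038-Remove-Colored-Pieces-if-Both-Neighbors-are-the-Same-Color.py | winnerOfGame
-- ===== SOURCE A (Python) =====
-- def winnerOfGame(colors: str) -> bool:
--     alice_dominance = 0
--
--     # if there're 3 same colors in a row,
--     # it's +1 point for one of the players
--     # Alice wins if she has higher score than Bob
--     # if score is the same, Bob wins
--     for idx in range(1, len(colors) - 1):
--         if colors[idx - 1] == colors[idx] == colors[idx + 1]:
--             if colors[idx] == 'A':
--                 alice_dominance += 1
--             else:
--                 alice_dominance -= 1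
--
--     return alice_dominance > 0
-- ===== SOURCE B (Python) =====
-- def winnerOfGame(colors: str) -> bool:
--     # Group into maximal runs of identical characters, then score per run:
--     # a run of length n contributes n-2 points (if >= 3) to its player.
--     runs = []
--     for c in colors:
--         if runs and runs[-1][0] == c:
--             runs[-1][1] += 1
--         else:
--             runs.append([c, 1])
--     score = 0
--     for ch, n in runs:
--         if n >= 3:
--             score += (n - 2) if ch == 'A' else (2 - n)
--     return score > 0
-- ===== Notes on version B (the rewrite author's own statement) =====
-- stated objective: idiomatic
-- what changed: B groups the string into maximal runs of equal characters and scores each run of length n as n-2 points for its player, instead of scanning every overlapping length-3 window by index.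
import Mathlib
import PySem

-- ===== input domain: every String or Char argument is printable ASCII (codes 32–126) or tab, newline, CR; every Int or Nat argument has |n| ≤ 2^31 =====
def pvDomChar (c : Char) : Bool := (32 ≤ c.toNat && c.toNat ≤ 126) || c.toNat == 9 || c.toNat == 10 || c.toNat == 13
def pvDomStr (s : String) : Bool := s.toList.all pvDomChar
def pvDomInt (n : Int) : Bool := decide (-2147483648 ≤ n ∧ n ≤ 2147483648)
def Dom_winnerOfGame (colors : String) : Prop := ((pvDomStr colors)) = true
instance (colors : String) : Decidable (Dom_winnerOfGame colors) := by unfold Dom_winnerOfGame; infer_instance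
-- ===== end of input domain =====

-- B replaces A's per-index scan of overlapping length-3 windows by a run-length
-- grouping pass plus a per-run score (idiomatic run aggregation; same cost).

-- ===== PORT A =====
def winnerOfGame (colors : String) : Bool :=
  decide (0 <
    (PySem.List.pyRange 1 ((colors.toList.length : Int) - 1) 1).foldl
      (fun acc idx =>
        if PySem.List.pyGet? colors.toList (idx - 1) = PySem.List.pyGet? colors.toList idx ∧
           PySem.List.pyGet? colors.toList idx = PySem.List.pyGet? colors.toList (idx + 1) then
          if PySem.List.pyGet? colors.toList idx = some 'A' then acc + 1 else acc - 1
        else acc) (0 : Int))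

-- ===== PORT B =====
-- runs are built with a reversed accumulator (head = Python's runs[-1]); the
-- final reverse restores Python's insertion order.
def pvAddRun (rs : List (Char × Int)) (c : Char) : List (Char × Int) :=
  match rs with
  | (c', n) :: t => if c' = c then (c', n + 1) :: t else (c, 1) :: (c', n) :: t
  | [] => [(c, 1)]

def winnerOfGame_alt (colors : String) : Bool :=
  decide (0 <
    ((colors.toList.foldl pvAddRun []).reverse).foldl
      (fun s p =>
        if 3 ≤ p.2 then s + (if p.1 = 'A' then p.2 - 2 else 2 - p.2) else s) (0 : Int))

-- ===== PRECONDITION & SPEC =====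
def Spec_winnerOfGame (colors : String) (out : Bool) : Prop := out = winnerOfGame_alt colors
instance (colors : String) (out : Bool) : Decidable (Spec_winnerOfGame colors out) := by unfold Spec_winnerOfGame; infer_instance

-- ===== CLAIM (what is proved, stated in full; the proofs are below) =====
def Claim_equal_winnerOfGame : Prop := ∀ (colors : String), Dom_winnerOfGame colors → Spec_winnerOfGame colors (winnerOfGame colors)

-- ===== LEMMAS AND PROOFS =====

/-- The weight of a triple of player `c`. -/
def pvW (c : Char) : Int := if c = 'A' then 1 else -1

/-- Structural triple score: the common reference both ports are reduced to. -/
def pvT : List Char → Int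
  | a :: b :: c :: t => (if a = b ∧ b = c then pvW b else 0) + pvT (b :: c :: t)
  | _ => 0

theorem pvT_short (l : List Char) (h : l.length ≤ 2) : pvT l = 0 := by
  match l, h with
  | [], _ => rfl
  | [_], _ => rfl
  | [_, _], _ => rfl

theorem pvT_cons3 (a b c : Char) (t : List Char) :
    pvT (a :: b :: c :: t) = (if a = b ∧ b = c then pvW b else 0) + pvT (b :: c :: t) := rfl

theorem pvT_skip (c d : Char) (t : List Char) (h : c ≠ d) :
    pvT (c :: d :: t) = pvT (d :: t) := by
  cases t with
  | nil => rfl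
  | cons e u => simp [pvT_cons3, h]

-- ---------- A side ----------

def pvNatBody (cs : List Char) (acc : Int) (k : Nat) : Int :=
  if cs[k]? = cs[k+1]? ∧ cs[k+1]? = cs[k+2]? then
    if cs[k+1]? = some 'A' then acc + 1 else acc - 1
  else acc

theorem pvNatBody_zero (x y z : Char) (u : List Char) (a : Int) :
    pvNatBody (x :: y :: z :: u) a 0 = a + (if x = y ∧ y = z then pvW y else 0) := by
  simp only [pvNatBody, pvW]
  simp only [List.getElem?_cons_zero, List.getElem?_cons_succ, Option.some.injEq]
  split_ifs <;> omega

theorem pvNatBody_shift (x : Char) (t : List Char) (a : Int) (k : Nat) :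
    pvNatBody (x :: t) a (k + 1) = pvNatBody t a k := by
  have h1 : (x :: t)[k+1]? = t[k]? := List.getElem?_cons_succ
  have h2 : (x :: t)[k+1+1]? = t[k+1]? := List.getElem?_cons_succ
  have h3 : (x :: t)[k+1+2]? = t[k+2]? := by
    show (x :: t)[(k+2)+1]? = t[k+2]?
    exact List.getElem?_cons_succ
  simp only [pvNatBody, h1, h2, h3]

theorem pvFoldA (cs : List Char) (a : Int) :
    (List.range (cs.length - 2)).foldl (pvNatBody cs) a = a + pvT cs := by
  induction cs generalizing a with
  | nil => simp [pvT]
  | cons x t ih =>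
    match t with
    | [] =>
      show a = a + pvT [x]
      rw [pvT_short [x] (by simp)]; ring
    | [y] =>
      show a = a + pvT [x, y]
      rw [pvT_short [x, y] (by simp)]; ring
    | y :: z :: u =>
      have hlen : (x :: y :: z :: u).length - 2 = ((y :: z :: u).length - 2) + 1 := by
        simp
      rw [hlen, List.range_succ_eq_map, List.foldl_cons, List.foldl_map]
      have hsh : (fun (acc : Int) (k : Nat) => pvNatBody (x :: y :: z :: u) acc k.succ)
          = pvNatBody (y :: z :: u) := by
        funext acc k
        exact pvNatBody_shift x (y :: z :: u) acc k
      rw [hsh, ih, pvNatBody_zero, pvT_cons3]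
      ring

theorem pvA_eq (cs : List Char) :
    (PySem.List.pyRange 1 ((cs.length : Int) - 1) 1).foldl
      (fun acc idx =>
        if PySem.List.pyGet? cs (idx - 1) = PySem.List.pyGet? cs idx ∧
           PySem.List.pyGet? cs idx = PySem.List.pyGet? cs (idx + 1) then
          if PySem.List.pyGet? cs idx = some 'A' then acc + 1 else acc - 1
        else acc) (0 : Int) = pvT cs := by
  rw [PySem.List.pyRange_one]
  have hn : (((cs.length : Int) - 1) - 1).toNat = cs.length - 2 := by omega
  rw [hn, List.foldl_map]
  have hb : (fun (acc : Int) (k : Nat) =>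
      if PySem.List.pyGet? cs (((1 : Int) + k) - 1) = PySem.List.pyGet? cs ((1 : Int) + k) ∧
         PySem.List.pyGet? cs ((1 : Int) + k) = PySem.List.pyGet? cs (((1 : Int) + k) + 1) then
        if PySem.List.pyGet? cs ((1 : Int) + k) = some 'A' then acc + 1 else acc - 1
      else acc) = pvNatBody cs := by
    funext acc k
    have h0 : ((1 : Int) + k) - 1 = ((k : Nat) : Int) := by omega
    have h2 : ((1 : Int) + k) + 1 = (((k + 2 : Nat)) : Int) := by push_cast; omega
    have h1 : ((1 : Int) + k) = (((k + 1 : Nat)) : Int) := by push_cast; omega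
    rw [h0, h2, h1]
    simp only [PySem.List.pyGet?_natCast, pvNatBody]
  rw [hb]
  have := pvFoldA cs 0
  omega

-- ---------- B side ----------

def pvContrib (p : Char × Int) : Int :=
  if 3 ≤ p.2 then (if p.1 = 'A' then p.2 - 2 else 2 - p.2) else 0

theorem pvFoldB (rs : List (Char × Int)) (a : Int) :
    rs.foldl (fun s p =>
      if 3 ≤ p.2 then s + (if p.1 = 'A' then p.2 - 2 else 2 - p.2) else s) a
      = a + (rs.map pvContrib).sum := by
  induction rs generalizing a with
  | nil => simp
  | cons p t ih =>
    simp only [List.foldl_cons, List.map_cons, List.sum_cons, ih, pvContrib]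
    split_ifs <;> ring

/-- Score added by extending the current run (char `c`, length `n`) with `cs`. -/
def pvExt (c : Char) (n : Int) : List Char → Int
  | [] => 0
  | d :: t => if d = c then (if 2 ≤ n then pvW c else 0) + pvExt c (n + 1) t else pvExt d 1 t

theorem pvExt_cons (c : Char) (n : Int) (d : Char) (t : List Char) :
    pvExt c n (d :: t)
      = if d = c then (if 2 ≤ n then pvW c else 0) + pvExt c (n + 1) t else pvExt d 1 t := rfl

theorem pvContrib_succ (c : Char) (n : Int) (h : 1 ≤ n) :
    pvContrib (c, n + 1) = pvContrib (c, n) + (if 2 ≤ n then pvW c else 0) := by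
  simp only [pvContrib, pvW]
  split_ifs <;> omega

theorem pvRunInv (cs : List Char) (c : Char) (n : Int) (rs : List (Char × Int)) (h : 1 ≤ n) :
    ((cs.foldl pvAddRun ((c, n) :: rs)).map pvContrib).sum
      = (((c, n) :: rs).map pvContrib).sum + pvExt c n cs := by
  induction cs generalizing c n rs with
  | nil => simp [pvExt]
  | cons d t ih =>
    rw [List.foldl_cons, pvExt_cons]
    by_cases hdc : d = c
    · subst hdc
      rw [show pvAddRun ((d, n) :: rs) d = (d, n + 1) :: rs from by simp [pvAddRun]]
      rw [if_pos rfl, ih d (n + 1) rs (by omega)]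
      simp only [List.map_cons, List.sum_cons]
      rw [pvContrib_succ d n h]
      ring
    · have hcd : c ≠ d := fun h' => hdc h'.symm
      rw [show pvAddRun ((c, n) :: rs) d = (d, 1) :: (c, n) :: rs from by simp [pvAddRun, hcd]]
      rw [if_neg hdc, ih d 1 ((c, n) :: rs) (by omega)]
      have h0 : pvContrib (d, 1) = 0 := by simp [pvContrib]
      simp only [List.map_cons, List.sum_cons, h0]
      ring

theorem pvExt_tscore (cs : List Char) :
    (∀ c, pvExt c 1 cs = pvT (c :: cs)) ∧
    (∀ c n, 2 ≤ n → pvExt c n cs = pvT (c :: c :: cs)) := by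
  induction cs with
  | nil =>
    refine ⟨fun c => ?_, fun c n _ => ?_⟩
    · show (0 : Int) = pvT [c]
      rw [pvT_short [c] (by simp)]
    · show (0 : Int) = pvT [c, c]
      rw [pvT_short [c, c] (by simp)]
  | cons d t ih =>
    refine ⟨fun c => ?_, fun c n hn => ?_⟩
    · rw [pvExt_cons]
      by_cases hdc : d = c
      · subst hdc
        rw [if_pos rfl, if_neg (by omega), show (1:Int)+1 = 2 from rfl, ih.2 d 2 (by omega)]
        ring
      · rw [if_neg hdc, ih.1 d, pvT_skip c d t (fun h => hdc h.symm)]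
    · rw [pvExt_cons]
      by_cases hdc : d = c
      · subst hdc
        rw [if_pos rfl, if_pos hn, ih.2 d (n + 1) (by omega)]
        rw [show pvT (d :: d :: d :: t) = pvW d + pvT (d :: d :: t) from by simp [pvT_cons3]]
      · have hcd : c ≠ d := fun h => hdc h.symm
        rw [if_neg hdc, ih.1 d]
        rw [show pvT (c :: c :: d :: t) = pvT (c :: d :: t) from by simp [pvT_cons3, hcd]]
        exact (pvT_skip c d t hcd).symm

theorem pvB_eq (cs : List Char) :
    (((cs.foldl pvAddRun []).reverse).foldl (fun s p =>
      if 3 ≤ p.2 then s + (if p.1 = 'A' then p.2 - 2 else 2 - p.2) else s) (0 : Int))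
      = pvT cs := by
  rw [pvFoldB, List.map_reverse, List.sum_reverse]
  cases cs with
  | nil => simp [pvT]
  | cons d t =>
    rw [List.foldl_cons, show pvAddRun [] d = [(d, 1)] from rfl]
    rw [pvRunInv t d 1 [] (by omega)]
    have h0 : pvContrib (d, 1) = 0 := by simp [pvContrib]
    simp [h0, (pvExt_tscore t).1 d]

-- ===== VERDICT (by name: the statement is the Claim_ definition above) =====
theorem winnerOfGame_spec : Claim_equal_winnerOfGame := by
  intro colors _
  unfold Spec_winnerOfGame winnerOfGame winnerOfGame_alt
  rw [pvA_eq, pvB_eq]
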